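-- pv_equiv track=rewrite | github.com/JeiKeiLim/TIL | coding_test/leetcode/2658_Maximum_Number_of_Fish_in_a_Grid.py | findMaxFish2
-- ===== SOURCE A (Python) =====
-- from typing import List
--
-- def findMaxFish2(grid: List[List[int]]) -> int:
--     n = len(grid)
--     m = len(grid[0])
--
--     directions = ((0, 1), (0, -1), (1, 0), (-1, 0))
--     visited = set()
--
--     def dfs(r: int, c: int) -> int:
--         if r < 0 or c < 0 or r >= n or c >= m or (r, c) in visited or grid[r][c] == 0:
--             return 0
--
--         visited.add((r, c))
--         result = 0
--         for dr, dc in directions: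
--             result += dfs(r + dr, c + dc)
--
--         return result + grid[r][c]
--
--     answer = 0
--     for i in range(n):
--         for j in range(m):
--             if (i, j) in visited:
--                 continue
--             answer = max(answer, dfs(i, j))
--
--     return answer
-- ===== SOURCE B (Python) =====
-- from typing import List
--
-- def findMaxFish2(grid: List[List[int]]) -> int:
--     n = len(grid)
--     m = len(grid[0])
--
--     directions = ((-1, 0), (1, 0), (0, -1), (0, 1))
--     visited = set()
--
--     answer = 0
--     for i in range(n):
--         for j in range(m):
--             if (i, j) in visited or grid[i][j] == 0:
--                 continue
--             total = 0
--             stack = [(i, j)]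
--             while stack:
--                 r, c = stack.pop()
--                 if r < 0 or c < 0 or r >= n or c >= m or (r, c) in visited or grid[r][c] == 0:
--                     continue
--                 visited.add((r, c))
--                 total += grid[r][c]
--                 for dr, dc in directions:
--                     stack.append((r + dr, c + dc))
--             answer = max(answer, total)
--     return answer
-- ===== Notes on version B (the rewrite author's own statement) =====
-- stated objective: alternative
-- what changed: The recursive DFS (nested dfs closure, one Python function call per neighbour probe) is replaced by an iterative flood fill with an explicit stack: each unvisited nonzero start cell seeds a worklist that is pop-expanded in a while loop; same visited-set discipline, identical return value, avoids recursion-depth limits.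
import Mathlib
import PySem

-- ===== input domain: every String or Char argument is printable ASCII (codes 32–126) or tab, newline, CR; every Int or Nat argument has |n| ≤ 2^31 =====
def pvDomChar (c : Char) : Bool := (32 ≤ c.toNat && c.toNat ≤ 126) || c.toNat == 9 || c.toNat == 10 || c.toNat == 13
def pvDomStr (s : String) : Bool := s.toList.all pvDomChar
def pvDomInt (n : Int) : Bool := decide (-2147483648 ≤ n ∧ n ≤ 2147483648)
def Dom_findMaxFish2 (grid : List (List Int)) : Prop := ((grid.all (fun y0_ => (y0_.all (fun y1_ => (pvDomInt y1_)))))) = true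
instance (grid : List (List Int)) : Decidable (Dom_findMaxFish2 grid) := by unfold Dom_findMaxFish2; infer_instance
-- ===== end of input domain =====

-- B replaces A's recursive DFS by an explicit-stack flood fill (same return value).

-- ===== PORT A =====
-- shared cell accessor grid[r][c]: only read after the 0 ≤ r < n, 0 ≤ c < m guard, where it is
-- exact under Pre_ (every row has at least (len grid[0]) entries)
def pvGet (grid : List (List Int)) (r c : Int) : Int :=
  PySem.List.pyGetD (PySem.List.pyGetD grid r []) c 0

-- the guard of A's dfs; Source B's while-loop uses the identical test, so it is shared
def pvStop (grid : List (List Int)) (n m : Int) (vis : PySem.Set (Int × Int)) (r c : Int) : Bool :=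
  decide (r < 0 ∨ c < 0 ∨ n ≤ r ∨ m ≤ c ∨ (r, c) ∈ vis ∨ pvGet grid r c = 0)

-- A's dfs; the loop over directions (0,1),(0,-1),(1,0),(-1,0) is unrolled in that order.
-- The Nat is fuel, threaded through the calls (third result component = leftover fuel); it is
-- pure termination plumbing: the port calls it with more fuel than Python makes dfs calls, so
-- the fuel-0 branch never yields the computed value, and 'min _ f' only makes the recursion
-- visibly decreasing (leftover fuel is ≤ f by pvDfs_fuel_le, so the min changes nothing).
set_option maxHeartbeats 1000000 in
def pvDfs (grid : List (List Int)) (n m : Int) :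
    Nat → Int → Int → PySem.Set (Int × Int) → Int × PySem.Set (Int × Int) × Nat
  | 0, _, _, vis => (0, vis, 0)
  | f+1, r, c, vis =>
    if pvStop grid n m vis r c then (0, vis, f)
    else
      let vis0 := PySem.Set.add vis (r, c)
      let p1 := pvDfs grid n m f r (c + 1) vis0
      let p2 := pvDfs grid n m (min p1.2.2 f) r (c - 1) p1.2.1
      let p3 := pvDfs grid n m (min p2.2.2 f) (r + 1) c p2.2.1
      let p4 := pvDfs grid n m (min p3.2.2 f) (r - 1) c p3.2.1
      (p1.1 + p2.1 + p3.1 + p4.1 + pvGet grid r c, p4.2.1, p4.2.2)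
  termination_by f => f
  decreasing_by
    all_goals first
      | exact Nat.lt_succ_self _
      | exact Nat.lt_succ_of_le (Nat.min_le_right _ _)

def findMaxFish2 (grid : List (List Int)) : Int :=
  let n : Int := grid.length
  let m : Int := (grid.headD []).length      -- len(grid[0]); Pre_ excludes the empty grid
  let F : Nat := 4 * grid.length * (grid.headD []).length + 5   -- fuel (termination plumbing)
  ((PySem.List.pyRange 0 n 1).foldl (fun st i =>
      (PySem.List.pyRange 0 m 1).foldl (fun st j =>
        if (i, j) ∈ st.2 then st
        else
          let p := pvDfs grid n m F i j st.2
          (max st.1 p.1, p.2.1)) st)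
    ((0 : Int), (PySem.Set.empty : PySem.Set (Int × Int)))).1

-- ===== PORT B =====
def pvDirsB : List (Int × Int) := [(-1, 0), (1, 0), (0, -1), (0, 1)]

-- Source B's while-loop: pop the top of the stack (list head here = Python list end), skip or
-- mark-and-expand. Nat fuel = termination plumbing only (one unit per pop; the port calls it
-- with more fuel than pops happen).
def pvRun (grid : List (List Int)) (n m : Int) :
    Nat → List (Int × Int) → PySem.Set (Int × Int) → Int → Int × PySem.Set (Int × Int)
  | 0, _, vis, total => (total, vis)
  | _+1, [], vis, total => (total, vis)
  | f+1, (r, c) :: rest, vis, total =>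
    if pvStop grid n m vis r c then pvRun grid n m f rest vis total
    else
      pvRun grid n m f
        (pvDirsB.foldl (fun st d => (r + d.1, c + d.2) :: st) rest)
        (PySem.Set.add vis (r, c)) (total + pvGet grid r c)
  termination_by f => f

def findMaxFish2_alt (grid : List (List Int)) : Int :=
  let n : Int := grid.length
  let m : Int := (grid.headD []).length
  let F : Nat := 4 * grid.length * (grid.headD []).length + 5
  ((PySem.List.pyRange 0 n 1).foldl (fun st i =>
      (PySem.List.pyRange 0 m 1).foldl (fun st j =>
        if (i, j) ∈ st.2 ∨ pvGet grid i j = 0 then st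
        else
          let q := pvRun grid n m F [(i, j)] st.2 0
          (max st.1 q.1, q.2)) st)
    ((0 : Int), (PySem.Set.empty : PySem.Set (Int × Int)))).1

-- ===== PRECONDITION & SPEC =====
-- Pre_ excludes exactly the inputs where Python A raises IndexError: the empty grid (grid[0])
-- and grids with some row shorter than the first row (grid[r][c] for a c < len(grid[0])).
def Pre_findMaxFish2 (grid : List (List Int)) : Prop :=
  grid ≠ [] ∧ ∀ row ∈ grid, (grid.headD []).length ≤ row.length
instance (grid : List (List Int)) : Decidable (Pre_findMaxFish2 grid) := by
  unfold Pre_findMaxFish2; infer_instance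

def pvWitness_findMaxFish2 : List (List Int) := [[1, 0], [0, 2]]

def Spec_findMaxFish2 (grid : List (List Int)) (out : Int) : Prop := out = findMaxFish2_alt grid
instance (grid : List (List Int)) (out : Int) : Decidable (Spec_findMaxFish2 grid out) := by
  unfold Spec_findMaxFish2; infer_instance

-- ===== CLAIM (what is proved, stated in full; the proofs are below) =====
def Claim_equal_findMaxFish2 : Prop := ∀ (grid : List (List Int)), Dom_findMaxFish2 grid → Pre_findMaxFish2 grid → Spec_findMaxFish2 grid (findMaxFish2 grid)

-- ===== LEMMAS AND PROOFS =====

lemma pvDfs_stop (grid : List (List Int)) (n m : Int) (f : Nat) (r c : Int)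
    (vis : PySem.Set (Int × Int)) (h : pvStop grid n m vis r c = true) :
    pvDfs grid n m (f + 1) r c vis = (0, vis, f) := by
  simp [pvDfs, h]

-- leftover fuel is at most the fuel put in
lemma pvDfs_fuel_le (grid : List (List Int)) (n m : Int) :
    ∀ (f : Nat) (r c : Int) (vis : PySem.Set (Int × Int)),
      (pvDfs grid n m f r c vis).2.2 ≤ f := by
  intro f
  induction f using Nat.strong_induction_on with
  | _ f ih =>
    cases f with
    | zero => intro r c vis; simp [pvDfs]
    | succ f =>
      intro r c vis
      by_cases h : pvStop grid n m vis r c = true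
      · rw [pvDfs_stop grid n m f r c vis h]
        exact Nat.le_succ f
      · simp only [pvDfs]
        rw [if_neg h]
        exact le_trans (le_trans (ih _ (Nat.lt_succ_of_le (Nat.min_le_right _ _)) _ _ _)
          (Nat.min_le_right _ _)) (Nat.le_succ f)

-- unfolding of the go-case, with the mins already discharged via pvDfs_fuel_le
lemma pvDfs_go (grid : List (List Int)) (n m : Int) (f : Nat) (r c : Int)
    (vis : PySem.Set (Int × Int)) (h : ¬ pvStop grid n m vis r c = true) :
    pvDfs grid n m (f + 1) r c vis =
      (let vis0 := PySem.Set.add vis (r, c)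
       let p1 := pvDfs grid n m f r (c + 1) vis0
       let p2 := pvDfs grid n m p1.2.2 r (c - 1) p1.2.1
       let p3 := pvDfs grid n m p2.2.2 (r + 1) c p2.2.1
       let p4 := pvDfs grid n m p3.2.2 (r - 1) c p3.2.1
       (p1.1 + p2.1 + p3.1 + p4.1 + pvGet grid r c, p4.2.1, p4.2.2)) := by
  simp only [pvDfs]
  rw [if_neg h]
  rw [Nat.min_eq_left (pvDfs_fuel_le grid n m f _ _ _)]
  rw [Nat.min_eq_left (le_trans (pvDfs_fuel_le grid n m _ _ _ _)
        (pvDfs_fuel_le grid n m f _ _ _))]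
  rw [Nat.min_eq_left (le_trans (pvDfs_fuel_le grid n m _ _ _ _)
        (le_trans (pvDfs_fuel_le grid n m _ _ _ _) (pvDfs_fuel_le grid n m f _ _ _)))]

-- the empty-stack loop returns (total, vis) at any fuel
lemma pvRun_nil (grid : List (List Int)) (n m : Int) (f : Nat)
    (vis : PySem.Set (Int × Int)) (total : Int) :
    pvRun grid n m f [] vis total = (total, vis) := by
  cases f <;> simp [pvRun]

-- simulation: popping (r,c) off the stack does exactly what one dfs(r,c) call does
lemma pvSim (grid : List (List Int)) (n m : Int) :
    ∀ (f : Nat) (r c : Int) (vis : PySem.Set (Int × Int)) (rest : List (Int × Int)) (total : Int),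
      pvRun grid n m f ((r, c) :: rest) vis total
        = pvRun grid n m (pvDfs grid n m f r c vis).2.2 rest
            (pvDfs grid n m f r c vis).2.1 (total + (pvDfs grid n m f r c vis).1) := by
  intro f
  induction f using Nat.strong_induction_on with
  | _ f ih =>
    cases f with
    | zero =>
      intro r c vis rest total
      simp [pvRun, pvDfs]
    | succ f =>
      intro r c vis rest total
      by_cases h : pvStop grid n m vis r c = true
      · rw [pvDfs_stop grid n m f r c vis h]
        simp [pvRun, h]
      · rw [pvDfs_go grid n m f r c vis h]
        simp only [pvRun]
        rw [if_neg h]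
        simp only [pvDirsB, List.foldl, add_zero, ← sub_eq_add_neg]
        have b1 : (pvDfs grid n m f r (c + 1) (PySem.Set.add vis (r, c))).2.2 ≤ f :=
          pvDfs_fuel_le grid n m f _ _ _
        set vis0 := PySem.Set.add vis (r, c) with hv0
        set p1 := pvDfs grid n m f r (c + 1) vis0 with hp1
        set p2 := pvDfs grid n m p1.2.2 r (c - 1) p1.2.1 with hp2
        have b2 : p2.2.2 ≤ p1.2.2 := pvDfs_fuel_le grid n m _ _ _ _
        set p3 := pvDfs grid n m p2.2.2 (r + 1) c p2.2.1 with hp3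
        have b3 : p3.2.2 ≤ p2.2.2 := pvDfs_fuel_le grid n m _ _ _ _
        set p4 := pvDfs grid n m p3.2.2 (r - 1) c p3.2.1 with hp4
        rw [ih f (by omega) r (c + 1) vis0, ← hp1]
        rw [ih p1.2.2 (by omega) r (c - 1) p1.2.1, ← hp2]
        rw [ih p2.2.2 (by omega) (r + 1) c p2.2.1, ← hp3]
        rw [ih p3.2.2 (by omega) (r - 1) c p3.2.1, ← hp4]
        congr 1
        ring

-- one cell of the outer double loop: A's skip-or-dfs step equals B's skip-or-floodfill step,
-- and the running answer stays nonnegative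
lemma pvCell (grid : List (List Int)) (n m : Int) (f : Nat) (i j : Int)
    (hi0 : 0 ≤ i) (hin : i < n) (hj0 : 0 ≤ j) (hjm : j < m)
    (st : Int × PySem.Set (Int × Int)) (hst : 0 ≤ st.1) :
    (if (i, j) ∈ st.2 then st
     else
       let p := pvDfs grid n m (f + 1) i j st.2
       (max st.1 p.1, p.2.1))
    = (if (i, j) ∈ st.2 ∨ pvGet grid i j = 0 then st
       else
         let q := pvRun grid n m (f + 1) [(i, j)] st.2 0
         (max st.1 q.1, q.2))
    ∧ 0 ≤ (if (i, j) ∈ st.2 then st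
           else
             let p := pvDfs grid n m (f + 1) i j st.2
             (max st.1 p.1, p.2.1)).1 := by
  by_cases hv : (i, j) ∈ st.2
  · simp [hv, hst]
  · by_cases hz : pvGet grid i j = 0
    · have hstop : pvStop grid n m st.2 i j = true := by
        simp [pvStop]; tauto
      rw [pvDfs_stop grid n m f i j st.2 hstop]
      simp [hv, hz, hst]
    · have hstop : ¬ pvStop grid n m st.2 i j = true := by
        simp [pvStop]
        constructor
        · omega
        · constructor
          · omega
          · constructor
            · omega
            · constructor
              · omega
              · exact ⟨hv, hz⟩
      have hq : pvRun grid n m (f + 1) [(i, j)] st.2 0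
          = ((pvDfs grid n m (f + 1) i j st.2).1, (pvDfs grid n m (f + 1) i j st.2).2.1) := by
        rw [pvSim grid n m (f + 1) i j st.2 [] 0, pvRun_nil]
        simp
      constructor
      · simp only [hv, if_false, hz, or_false, hq]
      · simp only [hv, if_false]
        exact le_trans hst (le_max_left _ _)

-- the inner 'for j' loop
lemma pvInner (grid : List (List Int)) (n m : Int) (f : Nat) (i : Int)
    (hi0 : 0 ≤ i) (hin : i < n) :
    ∀ (js : List Int), (∀ j ∈ js, 0 ≤ j ∧ j < m) →
    ∀ (st : Int × PySem.Set (Int × Int)), 0 ≤ st.1 →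
      (js.foldl (fun st j =>
          if (i, j) ∈ st.2 then st
          else
            let p := pvDfs grid n m (f + 1) i j st.2
            (max st.1 p.1, p.2.1)) st
        = js.foldl (fun st j =>
          if (i, j) ∈ st.2 ∨ pvGet grid i j = 0 then st
          else
            let q := pvRun grid n m (f + 1) [(i, j)] st.2 0
            (max st.1 q.1, q.2)) st)
      ∧ 0 ≤ (js.foldl (fun st j =>
          if (i, j) ∈ st.2 then st
          else
            let p := pvDfs grid n m (f + 1) i j st.2
            (max st.1 p.1, p.2.1)) st).1 := by
  intro js
  induction js with
  | nil => intro _ st hst; exact ⟨rfl, hst⟩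
  | cons j js ihj =>
    intro hb st hst
    have hj := hb j (List.mem_cons_self)
    have hcell := pvCell grid n m f i j hi0 hin hj.1 hj.2 st hst
    simp only [List.foldl_cons]
    rw [← hcell.1]
    exact ihj (fun x hx => hb x (List.mem_cons_of_mem _ hx)) _ hcell.2

-- the outer 'for i' loop
lemma pvOuter (grid : List (List Int)) (n m : Int) (f : Nat) :
    ∀ (is : List Int), (∀ i ∈ is, 0 ≤ i ∧ i < n) →
    ∀ (st : Int × PySem.Set (Int × Int)), 0 ≤ st.1 →
      (is.foldl (fun st i =>
          (PySem.List.pyRange 0 m 1).foldl (fun st j =>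
            if (i, j) ∈ st.2 then st
            else
              let p := pvDfs grid n m (f + 1) i j st.2
              (max st.1 p.1, p.2.1)) st) st
        = is.foldl (fun st i =>
          (PySem.List.pyRange 0 m 1).foldl (fun st j =>
            if (i, j) ∈ st.2 ∨ pvGet grid i j = 0 then st
            else
              let q := pvRun grid n m (f + 1) [(i, j)] st.2 0
              (max st.1 q.1, q.2)) st) st)
      ∧ 0 ≤ (is.foldl (fun st i =>
          (PySem.List.pyRange 0 m 1).foldl (fun st j =>
            if (i, j) ∈ st.2 then st
            else
              let p := pvDfs grid n m (f + 1) i j st.2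
              (max st.1 p.1, p.2.1)) st) st).1 := by
  intro is
  induction is with
  | nil => intro _ st hst; exact ⟨rfl, hst⟩
  | cons i is ihi =>
    intro hb st hst
    have hi := hb i (List.mem_cons_self)
    have hrow := pvInner grid n m f i hi.1 hi.2 (PySem.List.pyRange 0 m 1)
      (fun j hj => (PySem.List.mem_pyRange_one.mp hj)) st hst
    simp only [List.foldl_cons]
    rw [← hrow.1]
    exact ihi (fun x hx => hb x (List.mem_cons_of_mem _ hx)) _ hrow.2

-- ===== VERDICT (by name: the statement is the Claim_ definition above) =====
theorem findMaxFish2_spec : Claim_equal_findMaxFish2 := by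
  intro grid _ _
  simp only [Spec_findMaxFish2, findMaxFish2, findMaxFish2_alt]
  have hF : 4 * grid.length * (grid.headD []).length + 5
      = (4 * grid.length * (grid.headD []).length + 4) + 1 := by omega
  rw [hF]
  exact congrArg Prod.fst
    ((pvOuter grid grid.length (grid.headD []).length
        (4 * grid.length * (grid.headD []).length + 4)
        (PySem.List.pyRange 0 grid.length 1)
        (fun i hi => PySem.List.mem_pyRange_one.mp hi)
        (0, PySem.Set.empty) le_rfl).1)
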